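-- pv_equiv track=rewrite | github.com/inveniosoftware/license-changer | utils.py | remove_readme_rst_badges
-- ===== SOURCE A (Python) =====
-- def remove_readme_rst_badges(text):
--     matching = [
--         'shields.io/github/tag',
--         'shields.io/github/license',
--     ]
--     cnt = 0
--     new_out = []
--     for line in text.split('\n'):
--         if any(m in line for m in matching):
--             cnt = 3  # skip next 3 lines
--         if cnt == 0:
--             new_out.append(line)
--         else:
--             cnt -= 1
--     return "\n".join(new_out)
-- ===== SOURCE B (Python) =====
-- def remove_readme_rst_badges(text):
--     matching = [
--         'shields.io/github/tag',
--         'shields.io/github/license',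
--     ]
--     lines = text.split('\n')
--     flags = [any(m in line for m in matching) for line in lines]
--     kept = [line
--             for line, a, b, c in zip(lines, flags, [False] + flags, [False, False] + flags)
--             if not (a or b or c)]
--     return "\n".join(kept)
-- ===== Notes on version B (the rewrite author's own statement) =====
-- stated objective: alternative
-- what changed: Replaces the stateful countdown-counter scan with a precomputed per-line badge-flag list and a single windowed filter (keep a line iff neither it nor the two preceding lines match), expressed via zipping the flag list with its two shifts.
import Mathlib
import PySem

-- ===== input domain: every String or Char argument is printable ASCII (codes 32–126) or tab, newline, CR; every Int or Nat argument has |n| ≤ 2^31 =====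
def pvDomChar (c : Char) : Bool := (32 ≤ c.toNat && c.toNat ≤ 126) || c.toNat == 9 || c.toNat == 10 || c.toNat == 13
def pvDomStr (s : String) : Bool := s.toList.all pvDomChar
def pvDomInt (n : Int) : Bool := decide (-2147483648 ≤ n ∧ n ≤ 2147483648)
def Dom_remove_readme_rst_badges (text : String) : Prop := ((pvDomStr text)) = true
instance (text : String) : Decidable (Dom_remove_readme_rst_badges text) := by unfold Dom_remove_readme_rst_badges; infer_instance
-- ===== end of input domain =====

-- B replaces A's countdown-counter scan by a precomputed per-line badge-flag list zipped with
-- its two shifts and a single windowed filter (objective: alternative decomposition, same cost).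

-- ===== PORT A =====
-- text.split('\n'): sep is the nonempty literal "\n", so PySem.Str.split? is always `some`; .getD [] is unreachable
def remove_readme_rst_badges (text : String) : String :=
  let matching := ["shields.io/github/tag", "shields.io/github/license"]
  let r := ((PySem.Str.split? text "\n").getD []).foldl
    (fun (st : Int × List String) line =>
      let cnt := if matching.any (fun m => PySem.Str.isIn m line) then (3 : Int) else st.1
      if cnt = 0 then (cnt, st.2 ++ [line]) else (cnt - 1, st.2))
    ((0 : Int), ([] : List String))
  PySem.Str.join "\n" r.2

-- ===== PORT B =====
-- text.split('\n') as in port A; zip of four lists = nested pair zips, truncating to the shortest (= lines)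
def remove_readme_rst_badges_alt (text : String) : String :=
  let matching := ["shields.io/github/tag", "shields.io/github/license"]
  let lines := (PySem.Str.split? text "\n").getD []
  let flags := lines.map (fun line => matching.any (fun m => PySem.Str.isIn m line))
  let kept := ((lines.zip (flags.zip ((false :: flags).zip (false :: false :: flags)))).filter
      (fun p => !(p.2.1 || p.2.2.1 || p.2.2.2))).map (·.1)
  PySem.Str.join "\n" kept

-- ===== PRECONDITION & SPEC =====
def Spec_remove_readme_rst_badges (text : String) (out : String) : Prop := out = remove_readme_rst_badges_alt text
instance (text : String) (out : String) : Decidable (Spec_remove_readme_rst_badges text out) := by unfold Spec_remove_readme_rst_badges; infer_instance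

-- ===== CLAIM (what is proved, stated in full; the proofs are below) =====
def Claim_equal_remove_readme_rst_badges : Prop := ∀ (text : String), Dom_remove_readme_rst_badges text → Spec_remove_readme_rst_badges text (remove_readme_rst_badges text)

-- ===== LEMMAS AND PROOFS =====

-- A's loop as a structural recursion on the line list (P abstracts the badge test)
def pvLoopA (P : String → Bool) (c : Int) : List String → List String
  | [] => []
  | l :: rest =>
    let c' := if P l then (3 : Int) else c
    if c' = 0 then l :: pvLoopA P c' rest else pvLoopA P (c' - 1) rest

-- windowed filter: drop a line iff it, or one of the two previous lines, satisfies P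
def pvH (P : String → Bool) (p q : Bool) : List String → List String
  | [] => []
  | l :: rest =>
    if P l || p || q then pvH P (P l) p rest else l :: pvH P (P l) p rest

theorem pvFoldA (P : String → Bool) (ls : List String) : ∀ (c : Int) (acc : List String),
    (ls.foldl
      (fun (st : Int × List String) line =>
        let cnt := if P line then (3 : Int) else st.1
        if cnt = 0 then (cnt, st.2 ++ [line]) else (cnt - 1, st.2))
      (c, acc)).2 = acc ++ pvLoopA P c ls := by
  induction ls with
  | nil => intro c acc; simp [pvLoopA]
  | cons l rest ih =>
    intro c acc
    simp only [List.foldl_cons, pvLoopA]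
    by_cases hP : P l = true
    · simp only [hP, if_true]
      norm_num [ih]
    · simp only [Bool.not_eq_true] at hP
      simp only [hP, Bool.false_eq_true, if_false]
      by_cases hc : c = 0
      · simp [hc, ih]
      · simp [hc, ih]

def pvEnc (p q : Bool) : Int := if p then 2 else if q then 1 else 0

theorem pvLoopA_eq_h (P : String → Bool) (ls : List String) : ∀ (p q : Bool),
    pvLoopA P (pvEnc p q) ls = pvH P p q ls := by
  induction ls with
  | nil => intro p q; rfl
  | cons l rest ih =>
    intro p q
    simp only [pvLoopA, pvH]
    by_cases hP : P l = true
    · have i := ih true p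
      simp only [pvEnc, if_true] at i
      norm_num [hP, i]
    · simp only [Bool.not_eq_true] at hP
      cases p <;> cases q
      · norm_num [hP, pvEnc]; simpa [pvEnc] using ih false false
      · norm_num [hP, pvEnc]; simpa [pvEnc] using ih false false
      · norm_num [hP, pvEnc]; simpa [pvEnc] using ih false true
      · norm_num [hP, pvEnc]; simpa [pvEnc] using ih false true

theorem pvZip_eq_h (P : String → Bool) (ls : List String) : ∀ (p q : Bool),
    ((ls.zip ((ls.map P).zip ((p :: ls.map P).zip (q :: p :: ls.map P)))).filter
        (fun pr => !(pr.2.1 || pr.2.2.1 || pr.2.2.2))).map (·.1) = pvH P p q ls := by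
  induction ls with
  | nil => intro p q; rfl
  | cons l rest ih =>
    intro p q
    have i := ih (P l) p
    simp only [List.map_cons, List.zip_cons_cons, List.filter_cons] at i ⊢
    cases hP : P l <;> cases p <;> cases q <;> rw [hP] at i <;> simp only [Bool.not_or] at i <;> simp [hP, pvH, i]

-- ===== VERDICT (by name: the statement is the Claim_ definition above) =====
theorem remove_readme_rst_badges_spec : Claim_equal_remove_readme_rst_badges := by
  intro text _
  unfold Spec_remove_readme_rst_badges remove_readme_rst_badges remove_readme_rst_badges_alt
  simp only
  rw [pvFoldA (fun line => ["shields.io/github/tag", "shields.io/github/license"].any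
        (fun m => PySem.Str.isIn m line))]
  rw [List.nil_append,
    show (0 : Int) = pvEnc false false from rfl,
    pvLoopA_eq_h, ← pvZip_eq_h]
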